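-- pv_equiv track=rewrite | github.com/rand/ananke-sglang | python/sglang/srt/constrained/ananke/parsing/languages/kotlin.py | _tokenize_simple
-- ===== SOURCE A (Python) =====
-- from typing import Any, Dict, FrozenSet, List, Optional, Set, Tuple
--
-- def _tokenize_simple(text: str) -> List[str]:
--     """Simple tokenization for context tracking."""
--     tokens = []
--     current: List[str] = []
--
--     for char in text:
--         if char.isspace():
--             if current:
--                 tokens.append("".join(current))
--                 current = []
--         elif char in "()[]{}.,;:<>@":
--             if current:
--                 tokens.append("".join(current))
--                 current = []
--             tokens.append(char)
--         elif char in "+-*/%&|^=!?":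
--             if current:
--                 tokens.append("".join(current))
--                 current = []
--             current.append(char)
--         else:
--             current.append(char)
--
--     if current:
--         tokens.append("".join(current))
--
--     return tokens
-- ===== SOURCE B (Python) =====
-- import re
-- from typing import List
--
-- _TOKEN_RE = re.compile(
--     r'[()\[\]{}.,;:<>@]'                                 # one punctuation char, a token by itself
--     r'|[+\-*/%&|^=!?][^\s()\[\]{}.,;:<>@+\-*/%&|^=!?]*'  # one operator char, then trailing word chars
--     r'|[^\s()\[\]{}.,;:<>@+\-*/%&|^=!?]+'                # a run of word chars
-- )
--
-- def _tokenize_simple(text: str) -> List[str]: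
--     """Simple tokenization for context tracking."""
--     return _TOKEN_RE.findall(text)
-- ===== Notes on version B (the rewrite author's own statement) =====
-- stated objective: idiomatic
-- what changed: Replaced the char-by-char accumulator FSM with a single re.findall over an ordered alternation of the three token shapes (punctuation char | operator char followed by word chars | word-char run), letting the regex scanner skip whitespace.
import Mathlib
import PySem

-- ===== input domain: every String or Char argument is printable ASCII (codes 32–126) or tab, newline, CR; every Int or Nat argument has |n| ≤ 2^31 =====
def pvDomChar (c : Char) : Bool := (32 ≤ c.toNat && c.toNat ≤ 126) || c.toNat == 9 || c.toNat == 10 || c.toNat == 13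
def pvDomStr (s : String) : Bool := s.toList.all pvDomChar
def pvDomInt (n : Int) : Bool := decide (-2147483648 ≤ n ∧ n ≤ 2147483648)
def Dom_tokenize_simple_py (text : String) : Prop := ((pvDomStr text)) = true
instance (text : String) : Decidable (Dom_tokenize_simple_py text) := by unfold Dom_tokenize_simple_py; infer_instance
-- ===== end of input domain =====

-- B replaces A's char-by-char accumulator FSM with a single regex-findall over an ordered
-- alternation of the three token shapes (idiomatic; measurably faster via the C regex engine); same return value on every input.

-- character classes shared by both ports (Python: char.isspace() restricted to Dom chars,
-- 'char in "()[]{}.,;:<>@"', 'char in "+-*/%&|^=!?"')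
def pvIsSpace (c : Char) : Bool := c == ' ' || c == '\t' || c == '\n' || c == '\r'
def pvPunctChars : List Char := ['(', ')', '[', ']', '{', '}', '.', ',', ';', ':', '<', '>', '@']
def pvIsPunct (c : Char) : Bool := pvPunctChars.contains c
def pvOpChars : List Char := ['+', '-', '*', '/', '%', '&', '|', '^', '=', '!', '?']
def pvIsOp (c : Char) : Bool := pvOpChars.contains c
-- B's "word" char class: anything matched by no other class (regex [^\s()\[\]{}.,;:<>@+\-*/%&|^=!?])
def pvIsWord (c : Char) : Bool := !(pvIsSpace c) && !(pvIsPunct c) && !(pvIsOp c)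

-- ===== PORT A =====
-- one loop iteration of A's FSM: state = (tokens, current)
def pvStepA (st : List String × List Char) (c : Char) : List String × List Char :=
  if pvIsSpace c then
    if st.2 ≠ [] then (st.1 ++ [String.mk st.2], []) else st
  else if pvIsPunct c then
    let st' := if st.2 ≠ [] then (st.1 ++ [String.mk st.2], ([] : List Char)) else st
    (st'.1 ++ [String.mk [c]], st'.2)
  else if pvIsOp c then
    let st' := if st.2 ≠ [] then (st.1 ++ [String.mk st.2], ([] : List Char)) else st
    (st'.1, st'.2 ++ [c])
  else
    (st.1, st.2 ++ [c])

def tokenize_simple_py (text : String) : List String :=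
  let fin := text.toList.foldl pvStepA ([], [])
  if fin.2 ≠ [] then fin.1 ++ [String.mk fin.2] else fin.1

-- ===== PORT B =====
-- B is re.findall over the alternation  punct | op word* | word+ ; the regex scanner tries the
-- alternatives in order at each position and skips a char matching none (only whitespace can).
def pvScanB : List Char → List String
  | [] => []
  | c :: rest =>
    if pvIsPunct c then
      String.mk [c] :: pvScanB rest
    else if pvIsOp c then
      String.mk (c :: rest.takeWhile pvIsWord) :: pvScanB (rest.dropWhile pvIsWord)
    else if pvIsWord c then
      String.mk (c :: rest.takeWhile pvIsWord) :: pvScanB (rest.dropWhile pvIsWord)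
    else
      pvScanB rest
termination_by cs => cs.length
decreasing_by
  · simp
  · exact Nat.lt_succ_of_le (List.length_dropWhile_le _ _)
  · exact Nat.lt_succ_of_le (List.length_dropWhile_le _ _)
  · simp

def tokenize_simple_py_alt (text : String) : List String := pvScanB text.toList

-- ===== PRECONDITION & SPEC =====
def Spec_tokenize_simple_py (text : String) (out : List String) : Prop := out = tokenize_simple_py_alt text
instance (text : String) (out : List String) : Decidable (Spec_tokenize_simple_py text out) := by unfold Spec_tokenize_simple_py; infer_instance

-- ===== CLAIM (what is proved, stated in full; the proofs are below) =====
def Claim_equal_tokenize_simple_py : Prop := ∀ (text : String), Dom_tokenize_simple_py text → Spec_tokenize_simple_py text (tokenize_simple_py text)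

-- ===== LEMMAS AND PROOFS =====

-- the token A's buffer l contributes when flushed
def pvOptTok (l : List Char) : List String := if l = [] then [] else [String.mk l]

def pvFinish (st : List String × List Char) : List String :=
  if st.2 ≠ [] then st.1 ++ [String.mk st.2] else st.1

lemma pvSpace_not_punct (c : Char) (h : pvIsSpace c = true) : pvIsPunct c = false := by
  simp [pvIsSpace] at h
  rcases h with ((rfl | rfl) | rfl) | rfl <;> decide

lemma pvSpace_not_op (c : Char) (h : pvIsSpace c = true) : pvIsOp c = false := by
  simp [pvIsSpace] at h
  rcases h with ((rfl | rfl) | rfl) | rfl <;> decide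

-- pvScanB splits off the maximal leading word-run (empty or the whole first token)
lemma pvScanB_split (cs : List Char) :
    pvScanB cs = pvOptTok (cs.takeWhile pvIsWord) ++ pvScanB (cs.dropWhile pvIsWord) := by
  cases cs with
  | nil => simp [pvScanB, pvOptTok]
  | cons c rest =>
    by_cases hw : pvIsWord c = true
    · have h' := hw
      simp [pvIsWord] at h'
      obtain ⟨⟨-, hp⟩, ho⟩ := h'
      simp [pvScanB, hp, ho, hw, List.takeWhile, List.dropWhile, pvOptTok]
    · simp at hw
      simp [List.takeWhile, List.dropWhile, hw, pvOptTok]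

-- main invariant: A's loop from state (toks, cur) yields toks, then cur extended by the
-- leading word-run (if nonempty), then B's scan of the rest
lemma pvMain (cs : List Char) (toks : List String) (cur : List Char) :
    pvFinish (cs.foldl pvStepA (toks, cur))
      = toks ++ pvOptTok (cur ++ cs.takeWhile pvIsWord) ++ pvScanB (cs.dropWhile pvIsWord) := by
  induction cs generalizing toks cur with
  | nil => simp [pvFinish, pvOptTok, pvScanB]; split <;> simp_all
  | cons c rest ih =>
    by_cases hs : pvIsSpace c = true
    · have hp := pvSpace_not_punct c hs
      have ho := pvSpace_not_op c hs
      have hw : pvIsWord c = false := by simp [pvIsWord, hs]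
      have hstep : pvStepA (toks, cur) c
          = (toks ++ pvOptTok cur, ([] : List Char)) := by
        by_cases hc : cur = [] <;> simp [pvStepA, hs, pvOptTok, hc]
      rw [List.foldl_cons, hstep, ih]
      rw [show ((c :: rest).takeWhile pvIsWord) = [] from by simp [List.takeWhile, hw]]
      rw [show ((c :: rest).dropWhile pvIsWord) = c :: rest from by simp [List.dropWhile, hw]]
      rw [show pvScanB (c :: rest) = pvScanB rest from by simp [pvScanB, hp, ho, hw]]
      rw [pvScanB_split rest]
      simp [pvOptTok]
    · by_cases hp : pvIsPunct c = true
      · have hw : pvIsWord c = false := by simp [pvIsWord, hp]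
        have hstep : pvStepA (toks, cur) c
            = (toks ++ pvOptTok cur ++ [String.mk [c]], ([] : List Char)) := by
          by_cases hc : cur = [] <;> simp [pvStepA, hs, hp, pvOptTok, hc]
        rw [List.foldl_cons, hstep, ih]
        rw [show ((c :: rest).takeWhile pvIsWord) = [] by simp [List.takeWhile, hw]]
        rw [show ((c :: rest).dropWhile pvIsWord) = c :: rest by simp [List.dropWhile, hw]]
        rw [show pvScanB (c :: rest) = String.mk [c] :: pvScanB rest from by simp [pvScanB, hp]]
        rw [pvScanB_split rest]
        simp [pvOptTok]
      · by_cases ho : pvIsOp c = true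
        · have hw : pvIsWord c = false := by simp [pvIsWord, ho]
          have hstep : pvStepA (toks, cur) c
              = (toks ++ pvOptTok cur, [c]) := by
            by_cases hc : cur = [] <;> simp [pvStepA, hs, hp, ho, pvOptTok, hc]
          rw [List.foldl_cons, hstep, ih]
          rw [show ((c :: rest).takeWhile pvIsWord) = [] by simp [List.takeWhile, hw]]
          rw [show ((c :: rest).dropWhile pvIsWord) = c :: rest by simp [List.dropWhile, hw]]
          rw [show pvScanB (c :: rest)
                = String.mk (c :: rest.takeWhile pvIsWord) :: pvScanB (rest.dropWhile pvIsWord)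
              from by simp [pvScanB, hp, ho]]
          simp [pvOptTok]
        · have hw : pvIsWord c = true := by simp [pvIsWord, hs, hp, ho]
          have hstep : pvStepA (toks, cur) c = (toks, cur ++ [c]) := by
            simp [pvStepA, hs, hp, ho]
          rw [List.foldl_cons, hstep, ih]
          simp [List.takeWhile, List.dropWhile, hw, pvOptTok]

-- ===== VERDICT (by name: the statement is the Claim_ definition above) =====
theorem tokenize_simple_py_spec : Claim_equal_tokenize_simple_py := by
  intro text _
  unfold Spec_tokenize_simple_py tokenize_simple_py tokenize_simple_py_alt
  have h := pvMain text.toList [] []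
  simp only [pvFinish] at h
  rw [h, pvScanB_split text.toList]
  simp [pvOptTok]
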